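-- pv_equiv track=rewrite | github.com/maxim1982/exampl1_7 | open_visit.py | get_days_for_visits
-- ===== SOURCE A (Python) =====
-- schengen_constraint = 180
--
-- def date_difference(leave, arrive):
--     result = leave - arrive + 1
--     return result
--
-- def visit_length(visit):
--     return date_difference(visit[1], visit[0])
--
-- def get_days_for_visits(visits):
--     days_for_visits = []
--     for visit in visits:
--         days_for_visit = 0
--         for past_visit in visits:
--             if visit[0] - schengen_constraint < past_visit[0] < visit[0]:
--                 days_for_visit += visit_length(past_visit)
--         days_for_visit += visit_length(visit)
--         days_for_visits.append(days_for_visit)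
--     return days_for_visits
-- ===== SOURCE B (Python) =====
-- schengen_constraint = 180
--
-- def _bisect_left(a, x):
--     lo, hi = 0, len(a)
--     while lo < hi:
--         mid = (lo + hi) // 2
--         if a[mid] < x:
--             lo = mid + 1
--         else:
--             hi = mid
--     return lo
--
-- def _bisect_right(a, x):
--     lo, hi = 0, len(a)
--     while lo < hi:
--         mid = (lo + hi) // 2
--         if x < a[mid]:
--             hi = mid
--         else:
--             lo = mid + 1
--     return lo
--
-- def get_days_for_visits(visits):
--     ordered = sorted(visits, key=lambda v: v[0])
--     starts = [v[0] for v in ordered]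
--     prefix = [0]
--     total = 0
--     for v in ordered:
--         total += v[1] - v[0] + 1
--         prefix.append(total)
--     out = []
--     for v in visits:
--         lo = _bisect_right(starts, v[0] - schengen_constraint)
--         hi = _bisect_left(starts, v[0])
--         out.append(prefix[hi] - prefix[lo] + (v[1] - v[0] + 1))
--     return out
-- ===== Notes on version B (the rewrite author's own statement) =====
-- stated objective: faster
-- what changed: Replaced A's quadratic nested scan (for every visit, re-scan all visits for starts in the 180-day window) by sorting visits by start once, building a prefix-sum array of visit lengths, and answering each visit with two binary searches on the sorted starts.
import Mathlib
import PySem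

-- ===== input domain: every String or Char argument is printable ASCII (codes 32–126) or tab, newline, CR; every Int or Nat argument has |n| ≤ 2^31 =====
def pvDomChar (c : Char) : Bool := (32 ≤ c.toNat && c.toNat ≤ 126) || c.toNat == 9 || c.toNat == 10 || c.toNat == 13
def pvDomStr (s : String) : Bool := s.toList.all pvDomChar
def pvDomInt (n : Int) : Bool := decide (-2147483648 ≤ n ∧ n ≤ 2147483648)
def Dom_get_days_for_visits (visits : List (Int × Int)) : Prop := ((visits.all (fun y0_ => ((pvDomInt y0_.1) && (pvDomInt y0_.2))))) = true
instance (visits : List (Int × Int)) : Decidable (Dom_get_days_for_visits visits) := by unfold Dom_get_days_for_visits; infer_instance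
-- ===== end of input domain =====

-- B replaces A's quadratic nested scan by sort + prefix sums + binary search (O(n log n)); return value proved equal.


def schengen_constraint : Int := 180

-- ===== PORT A =====
def date_difference (leave arrive : Int) : Int := leave - arrive + 1

def visit_length (visit : Int × Int) : Int := date_difference visit.2 visit.1

def get_days_for_visits (visits : List (Int × Int)) : List Int :=
  visits.foldl (fun days_for_visits visit =>
    days_for_visits ++
      [(visits.foldl (fun days_for_visit past_visit =>
          if visit.1 - schengen_constraint < past_visit.1 ∧ past_visit.1 < visit.1 then
            days_for_visit + visit_length past_visit
          else days_for_visit) 0)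
        + visit_length visit]) []

-- ===== PORT B =====
-- Source B's `_bisect_left`/`_bisect_right` are letter-for-letter the standard lo/hi halving loop,
-- which is exactly how PySem.List.bisectLeft / bisectRight are defined; they are used as the port.
def get_days_for_visits_alt (visits : List (Int × Int)) : List Int :=
  let ordered := PySem.List.sorted visits (fun v => v.1) false
  let starts := ordered.map (fun v => v.1)
  -- prefix sums built with a running total; indices used below are in range, so getD is exact
  let pre := (ordered.foldl (fun (s : List Int × Int) v =>
      (s.1 ++ [s.2 + (v.2 - v.1 + 1)], s.2 + (v.2 - v.1 + 1))) ([(0 : Int)], 0)).1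
  visits.foldl (fun out v =>
    let lo := PySem.List.bisectRight starts (v.1 - schengen_constraint)
    let hi := PySem.List.bisectLeft starts v.1
    out ++ [pre.getD hi 0 - pre.getD lo 0 + (v.2 - v.1 + 1)]) []

-- ===== PRECONDITION & SPEC =====
def Spec_get_days_for_visits (visits : List (Int × Int)) (out : List Int) : Prop := out = get_days_for_visits_alt visits
instance (visits : List (Int × Int)) (out : List Int) : Decidable (Spec_get_days_for_visits visits out) := by unfold Spec_get_days_for_visits; infer_instance

-- ===== CLAIM (what is proved, stated in full; the proofs are below) =====
def Claim_equal_get_days_for_visits : Prop := ∀ (visits : List (Int × Int)), Dom_get_days_for_visits visits → Spec_get_days_for_visits visits (get_days_for_visits visits)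

-- ===== LEMMAS AND PROOFS =====

-- one-input window: A's inner fold is the sum of visit lengths over a filter
theorem foldl_if_sum (a b : Int) (xs : List (Int × Int)) : ∀ (d : Int),
    List.foldl (fun days pv => if a < pv.1 ∧ pv.1 < b then days + visit_length pv else days) d xs
      = d + ((xs.filter (fun pv => decide (a < pv.1 ∧ pv.1 < b))).map visit_length).sum := by
  induction xs with
  | nil => intro d; simp
  | cons v xs ih =>
    intro d
    by_cases h : a < v.1 ∧ v.1 < b
    · simp [h, ih]; ring
    · simp [h, ih]

-- on a key-sorted list, a downward-closed filter is a prefix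
theorem filter_down_eq_take {α : Type} (key : α → Int) (p : α → Bool)
    (hmono : ∀ u w : α, key u ≤ key w → p w = true → p u = true) :
    ∀ xs : List α, xs.Pairwise (fun x y => key x ≤ key y) →
      xs.filter p = xs.take (xs.countP p) := by
  intro xs hxs
  induction xs with
  | nil => simp
  | cons v xs ih =>
    rcases List.pairwise_cons.1 hxs with ⟨hv, hxs'⟩
    by_cases hp : p v = true
    · simp [hp, ih hxs']
    · have hz : xs.countP p = 0 :=
        List.countP_eq_zero.2 (fun w hw hpw => hp (hmono v w (hv w hw) hpw))
      have hf : xs.filter p = [] :=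
        List.filter_eq_nil_iff.2 (fun w hw hpw => hp (hmono v w (hv w hw) hpw))
      simp [hp, hz, hf]

theorem countP_take_eq (xs : List Int) (i : Nat) (hi : i ≤ xs.length)
    (p : Int → Bool) (h : ∀ (j : Nat) (hj : j < xs.length), j < i → p xs[j] = true) :
    (xs.take i).countP p = i := by
  have hlen : (xs.take i).length = i := by simp [hi]
  rw [List.countP_eq_length.2 (by
    intro y hy
    rcases List.mem_take_iff_getElem.1 hy with ⟨j, hj, rfl⟩
    exact h j (lt_of_lt_of_le (Nat.lt_min.1 hj).1 hi) (Nat.lt_min.1 hj).1), hlen]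

theorem countP_drop_zero (xs : List Int) (i : Nat)
    (p : Int → Bool) (h : ∀ (j : Nat) (hj : j < xs.length), i ≤ j → p xs[j] = false) :
    (xs.drop i).countP p = 0 := by
  exact List.countP_eq_zero.2 (by
    intro y hy
    rcases List.mem_drop_iff_getElem.1 hy with ⟨j, hj, rfl⟩
    simp [h (i + j) (by omega) (by omega)])

theorem bisectLeft_eq_countP (xs : List Int) (x : Int) (h : xs.Pairwise (· ≤ ·)) :
    PySem.List.bisectLeft xs x = xs.countP (fun y => decide (y < x)) := by
  obtain ⟨hle, hlt, hge⟩ := PySem.List.bisectLeft_spec xs x h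
  have h1 : (xs.take (PySem.List.bisectLeft xs x)).countP (fun y => decide (y < x))
      = PySem.List.bisectLeft xs x :=
    countP_take_eq xs _ hle _ (fun j hj hji => by simp [hlt j hj hji])
  have h2 : (xs.drop (PySem.List.bisectLeft xs x)).countP (fun y => decide (y < x)) = 0 :=
    countP_drop_zero xs _ _ (fun j hj hji => by
      simp only [decide_eq_false_iff_not, not_lt]; exact hge j hj hji)
  have key : xs.countP (fun y => decide (y < x))
      = (xs.take (PySem.List.bisectLeft xs x)).countP (fun y => decide (y < x))
        + (xs.drop (PySem.List.bisectLeft xs x)).countP (fun y => decide (y < x)) := by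
    rw [← List.countP_append, List.take_append_drop]
  omega

theorem bisectRight_eq_countP (xs : List Int) (x : Int) (h : xs.Pairwise (· ≤ ·)) :
    PySem.List.bisectRight xs x = xs.countP (fun y => decide (y ≤ x)) := by
  obtain ⟨hle, hlt, hge⟩ := PySem.List.bisectRight_spec xs x h
  have h1 : (xs.take (PySem.List.bisectRight xs x)).countP (fun y => decide (y ≤ x))
      = PySem.List.bisectRight xs x :=
    countP_take_eq xs _ hle _ (fun j hj hji => by simp [hlt j hj hji])
  have h2 : (xs.drop (PySem.List.bisectRight xs x)).countP (fun y => decide (y ≤ x)) = 0 :=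
    countP_drop_zero xs _ _ (fun j hj hji => by
      simp only [decide_eq_false_iff_not, not_le]; exact hge j hj hji)
  have key : xs.countP (fun y => decide (y ≤ x))
      = (xs.take (PySem.List.bisectRight xs x)).countP (fun y => decide (y ≤ x))
        + (xs.drop (PySem.List.bisectRight xs x)).countP (fun y => decide (y ≤ x)) := by
    rw [← List.countP_append, List.take_append_drop]
  omega

-- B's prefix-sum fold, closed form
theorem pre_fst : ∀ (xs : List (Int × Int)) (p : List Int) (t : Int),
    (xs.foldl (fun (s : List Int × Int) v =>
        (s.1 ++ [s.2 + (v.2 - v.1 + 1)], s.2 + (v.2 - v.1 + 1))) (p, t)).1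
      = p ++ (List.range xs.length).map
          (fun k => t + ((xs.take (k + 1)).map visit_length).sum) := by
  intro xs
  induction xs with
  | nil => intro p t; simp
  | cons v xs ih =>
    intro p t
    simp only [List.foldl_cons, List.length_cons, List.range_succ_eq_map, List.map_cons,
      List.map_map, ih]
    simp [visit_length, date_difference, Function.comp_def, add_assoc]

theorem pre_getD (xs : List (Int × Int)) (k : Nat) (hk : k ≤ xs.length) :
    ((xs.foldl (fun (s : List Int × Int) v =>
        (s.1 ++ [s.2 + (v.2 - v.1 + 1)], s.2 + (v.2 - v.1 + 1))) ([(0 : Int)], 0)).1).getD k 0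
      = ((xs.take k).map visit_length).sum := by
  rw [pre_fst]
  cases k with
  | zero => simp
  | succ j =>
    have hj : j < xs.length := by omega
    simp [List.getD, List.getElem?_map, List.getElem?_range hj]

-- window sum on the sorted list = difference of two prefix sums
theorem window_sum (xs : List (Int × Int)) (h : xs.Pairwise (fun x y => x.1 ≤ y.1))
    (a b : Int) (hab : a < b) :
    ((xs.filter (fun v => decide (a < v.1 ∧ v.1 < b))).map visit_length).sum
      = ((xs.take (xs.countP (fun v => decide (v.1 < b)))).map visit_length).sum
        - ((xs.take (xs.countP (fun v => decide (v.1 ≤ a)))).map visit_length).sum := by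
  set pA : (Int × Int) → Bool := fun v => decide (v.1 ≤ a) with hpA
  set pB : (Int × Int) → Bool := fun v => decide (v.1 < b) with hpB
  set cl := xs.countP pA with hclDef
  set ch := xs.countP pB with hchDef
  have hA : xs.filter pA = xs.take cl :=
    filter_down_eq_take (fun v => v.1) pA
      (fun u w huw hw => by simp [hpA] at *; omega) xs h
  have hB : xs.filter pB = xs.take ch :=
    filter_down_eq_take (fun v => v.1) pB
      (fun u w huw hw => by simp [hpB] at *; omega) xs h
  have hclch : cl ≤ ch := List.countP_mono_left (fun v _ hv => by simp [hpA, hpB] at *; omega)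
  have hcl_len : cl ≤ xs.length := List.countP_le_length
  have hch_len : ch ≤ xs.length := List.countP_le_length
  -- split take ch into take cl ++ mid
  have hsplit : xs.take ch = xs.take cl ++ (xs.take ch).drop cl := by
    conv_lhs => rw [← List.take_append_drop cl (xs.take ch)]
    rw [List.take_take, Nat.min_eq_left hclch]
  set mid := (xs.take ch).drop cl with hmidDef
  -- every element of take cl satisfies pA
  have htakecl : ∀ v ∈ xs.take cl, pA v = true := by
    intro v hv; rw [← hA] at hv; exact List.of_mem_filter hv
  have hlen_takecl : (xs.take cl).length = cl := by simp [hcl_len]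
  -- no element of mid satisfies pA
  have hcount_takecl : (xs.take cl).countP pA = cl := by
    rw [List.countP_eq_length.2 htakecl, hlen_takecl]
  have hcount_mid : mid.countP pA = 0 := by
    have h1 : xs.countP pA = (xs.take ch).countP pA + (xs.drop ch).countP pA := by
      rw [← List.countP_append, List.take_append_drop]
    have h2 : (xs.take ch).countP pA = cl + mid.countP pA := by
      rw [hsplit, List.countP_append, hcount_takecl]
    omega
  have hmidA : ∀ v ∈ mid, pA v = false := by
    intro v hv
    have := List.countP_eq_zero.1 hcount_mid v hv
    simpa using this
  -- the window filter equals mid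
  have hWfilter : xs.filter (fun v => decide (a < v.1 ∧ v.1 < b)) = mid := by
    have hcongr : xs.filter (fun v => decide (a < v.1 ∧ v.1 < b))
        = xs.filter (fun v => (!pA v) && pB v) := by
      apply List.filter_congr
      intro v _
      by_cases h1 : v.1 ≤ a <;> by_cases h2 : v.1 < b <;>
        simp [hpA, hpB, h1, h2] <;> omega
    rw [hcongr, ← List.filter_filter, hB, hsplit, List.filter_append]
    have e1 : (xs.take cl).filter (fun v => !pA v) = [] :=
      List.filter_eq_nil_iff.2 (fun v hv => by simp [htakecl v hv])
    have e2 : mid.filter (fun v => !pA v) = mid :=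
      List.filter_eq_self.2 (fun v hv => by simp [hmidA v hv])
    rw [e1, e2, List.nil_append]
  rw [hWfilter]
  have hsum : ((xs.take ch).map visit_length).sum
      = ((xs.take cl).map visit_length).sum + (mid.map visit_length).sum := by
    rw [hsplit, List.map_append, List.sum_append]
  omega

-- the per-visit values of A and B agree
theorem point_eq (visits : List (Int × Int)) (v : Int × Int) :
    (visits.foldl (fun days pv =>
        if v.1 - schengen_constraint < pv.1 ∧ pv.1 < v.1 then days + visit_length pv else days) 0)
      + visit_length v
    = (let ordered := PySem.List.sorted visits (fun w => w.1) false
       let starts := ordered.map (fun w => w.1)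
       let pre := (ordered.foldl (fun (s : List Int × Int) w =>
           (s.1 ++ [s.2 + (w.2 - w.1 + 1)], s.2 + (w.2 - w.1 + 1))) ([(0 : Int)], 0)).1
       pre.getD (PySem.List.bisectLeft starts v.1) 0
         - pre.getD (PySem.List.bisectRight starts (v.1 - schengen_constraint)) 0
         + (v.2 - v.1 + 1)) := by
  set ordered := PySem.List.sorted visits (fun w => w.1) false with hord
  have hpair : ordered.Pairwise (fun x y => x.1 ≤ y.1) := PySem.List.sorted_pairwise visits _
  have hperm : ordered.Perm visits := PySem.List.sorted_perm visits _ _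
  set starts := ordered.map (fun w => w.1) with hstarts
  have hpairS : starts.Pairwise (· ≤ ·) := List.Pairwise.map _ (fun _ _ h => h) hpair
  set a := v.1 - schengen_constraint with ha
  have hab : a < v.1 := by simp [ha, schengen_constraint]
  -- bisect positions as counts over ordered
  have hhi : PySem.List.bisectLeft starts v.1
      = ordered.countP (fun w => decide (w.1 < v.1)) := by
    rw [bisectLeft_eq_countP starts v.1 hpairS, hstarts, List.countP_map]
    rfl
  have hlo : PySem.List.bisectRight starts a
      = ordered.countP (fun w => decide (w.1 ≤ a)) := by
    rw [bisectRight_eq_countP starts a hpairS, hstarts, List.countP_map]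
    rfl
  -- A's inner fold as a filtered sum, transported to ordered
  have hinner : (visits.foldl (fun days pv =>
      if a < pv.1 ∧ pv.1 < v.1 then days + visit_length pv else days) 0)
      = ((ordered.filter (fun pv => decide (a < pv.1 ∧ pv.1 < v.1))).map visit_length).sum := by
    rw [foldl_if_sum a v.1 visits 0, zero_add]
    exact (((hperm.symm).filter _).map visit_length).sum_eq
  simp only []
  rw [hinner, window_sum ordered hpair a v.1 hab, hhi, hlo,
    pre_getD ordered _ List.countP_le_length, pre_getD ordered _ List.countP_le_length]
  simp [visit_length, date_difference]


-- ===== VERDICT (by name: the statement is the Claim_ definition above) =====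
theorem get_days_for_visits_spec : Claim_equal_get_days_for_visits := by
  intro visits _
  unfold Spec_get_days_for_visits get_days_for_visits get_days_for_visits_alt
  simp only []
  rw [PySem.List.foldl_append_singleton_eq_map
      (fun visit => (visits.foldl (fun days pv =>
        if visit.1 - schengen_constraint < pv.1 ∧ pv.1 < visit.1 then days + visit_length pv else days) 0)
        + visit_length visit) visits [],
    PySem.List.foldl_append_singleton_eq_map _ visits []]
  simp only [List.nil_append]
  apply List.map_congr_left
  intro v _
  exact point_eq visits v
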